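-- pv_equiv track=rewrite | github.com/HibaIBegum/CodeSignal | Arcade/Intro/matrixElementsSum.py | solution
-- ===== SOURCE A (Python) =====
-- def solution(matrix):
--     for i in range(1, len(matrix)):
--         for j in range(len(matrix[i])):
--             if matrix[i - 1][j] == 0:
--                 matrix[i][j] = 0
--     sum = 0
--     for row in matrix:
--         for room in row:
--             sum += room
--     return sum
-- ===== SOURCE B (Python) =====
-- def solution(matrix):
--     if not matrix:
--         return 0
--     total = 0
--     for j in range(len(matrix[0])):
--         for row in matrix:
--             if j >= len(row):
--                 break
--             v = row[j]
--             if v == 0: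
--                 break
--             total += v
--     return total
-- ===== Notes on version B (the rewrite author's own statement) =====
-- stated objective: alternative
-- what changed: B replaces A's two phases (row-major in-place zero propagation over the matrix, then a full row-major summation pass) by a single column-wise sweep that sums each column's prefix up to the first zero and never mutates the matrix (equivalence is about the return value only).
import Mathlib
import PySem

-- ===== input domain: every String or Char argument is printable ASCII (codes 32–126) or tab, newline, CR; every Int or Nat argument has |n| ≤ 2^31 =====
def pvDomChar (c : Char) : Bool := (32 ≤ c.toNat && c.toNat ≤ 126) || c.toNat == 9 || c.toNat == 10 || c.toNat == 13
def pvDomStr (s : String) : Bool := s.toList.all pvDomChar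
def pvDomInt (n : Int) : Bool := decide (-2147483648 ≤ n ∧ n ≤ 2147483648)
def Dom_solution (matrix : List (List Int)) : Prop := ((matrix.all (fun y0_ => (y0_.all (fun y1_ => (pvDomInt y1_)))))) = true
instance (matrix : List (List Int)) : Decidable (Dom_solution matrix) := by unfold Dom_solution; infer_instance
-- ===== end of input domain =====

-- B replaces A's in-place zero propagation followed by a summation pass with one column-wise sweep that
-- sums each column's prefix up to its first zero; the equivalence proved is about the RETURN value only
-- (A mutates its argument in place, B does not).

-- ===== PORT A =====
def solution (matrix : List (List Int)) : Int :=
  let m2 := (List.range' 1 (matrix.length - 1)).foldl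
    (fun m i =>
      (List.range (m.getD i []).length).foldl
        (fun m' j =>
          if (m'.getD (i-1) []).getD j 1 = 0 then m'.set i ((m'.getD i []).set j 0) else m') m)
    matrix
  m2.foldl (fun s row => row.foldl (fun s x => s + x) s) 0

-- ===== PORT B =====
-- the inner 'for row in matrix' loop of B for a fixed column j (both breaks return the running 0)
def colSum : List (List Int) → Nat → Int
  | [], _ => 0
  | r :: rs, j =>
    match r[j]? with
    | none => 0
    | some v => if v = 0 then 0 else v + colSum rs j

def solution_alt (matrix : List (List Int)) : Int :=
  match matrix with
  | [] => 0
  | r0 :: _ => (List.range r0.length).foldl (fun total j => total + colSum matrix j) 0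

-- ===== PRECONDITION & SPEC =====
-- Pre_ excludes exactly the ragged matrices on which the Python A raises IndexError
-- (some row longer than the row above it); A returns normally on everything else.
def Pre_solution (matrix : List (List Int)) : Prop :=
  List.IsChain (fun a b => b.length ≤ a.length) matrix
instance (matrix : List (List Int)) : Decidable (Pre_solution matrix) := by unfold Pre_solution; infer_instance
def pvWitness_solution : List (List Int) := [[1, 2, 3], [0, 5, 6], [7, 8, 9]]

def Spec_solution (matrix : List (List Int)) (out : Int) : Prop := out = solution_alt matrix
instance (matrix : List (List Int)) (out : Int) : Decidable (Spec_solution matrix out) := by unfold Spec_solution; infer_instance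

-- ===== CLAIM (what is proved, stated in full; the proofs are below) =====
def Claim_equal_solution : Prop := ∀ (matrix : List (List Int)), Dom_solution matrix → Pre_solution matrix → Spec_solution matrix (solution matrix)

-- ===== LEMMAS AND PROOFS =====

-- zeroing a row under a (final) previous row: position j becomes 0 where the previous row holds 0
def zap : List Int → List Int → List Int
  | _, [] => []
  | [], r => r
  | a :: p, b :: r => (if a = 0 then 0 else b) :: zap p r

-- the rows below an already-final previous row, after A's propagation
def go : List Int → List (List Int) → List (List Int)
  | _, [] => []
  | p, r :: rs => zap p r :: go (zap p r) rs

-- the final form of the last row after propagating through a block of rows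
def lastGo : List Int → List (List Int) → List Int
  | p, [] => p
  | p, r :: rs => lastGo (zap p r) rs

-- adjacent row lengths are nonincreasing, starting below a row of length n
def chainLe : Nat → List (List Int) → Prop
  | _, [] => True
  | n, r :: rs => r.length ≤ n ∧ chainLe r.length rs

theorem zap_nil_right (p : List Int) : zap p [] = [] := by cases p <;> rfl

theorem zap_length (p r : List Int) : (zap p r).length = r.length := by
  induction r generalizing p with
  | nil => simp [zap_nil_right]
  | cons b r ih => cases p with
    | nil => rfl
    | cons a p => simp [zap, ih]

theorem go_length (p : List Int) (rs : List (List Int)) : (go p rs).length = rs.length := by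
  induction rs generalizing p with
  | nil => rfl
  | cons r rs ih => simp [go, ih]

theorem zap_get? (p r : List Int) (n : Nat) :
    (zap p r)[n]? = (r[n]?).map (fun v => if p.getD n 1 = 0 then 0 else v) := by
  induction r generalizing p n with
  | nil => simp [zap_nil_right]
  | cons b r ih =>
    cases p with
    | nil => simp [zap, List.getD]
    | cons a p =>
      cases n with
      | zero => simp [zap, List.getD]
      | succ n => simp only [zap, List.getElem?_cons_succ, ih, List.getD_cons_succ]

theorem fold_set_length (p r : List Int) (k : Nat) :
    (((List.range k).foldl (fun r j => if p.getD j 1 = 0 then r.set j 0 else r) r)).length = r.length := by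
  induction k with
  | zero => rfl
  | succ k ih =>
    rw [List.range_succ, List.foldl_append]
    simp only [List.foldl_cons, List.foldl_nil]
    split
    · rw [List.length_set, ih]
    · exact ih

theorem fold_set_get? (p r : List Int) (k n : Nat) :
    (((List.range k).foldl (fun r j => if p.getD j 1 = 0 then r.set j 0 else r) r))[n]? =
      if p.getD n 1 = 0 ∧ n < k then (r[n]?).map (fun _ => (0 : Int)) else r[n]? := by
  induction k generalizing n with
  | zero => simp
  | succ k ih =>
    rw [List.range_succ, List.foldl_append]
    simp only [List.foldl_cons, List.foldl_nil]
    by_cases hk : p.getD k 1 = 0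
    · rw [if_pos hk, List.getElem?_set, fold_set_length]
      by_cases hkn : k = n
      · subst hkn
        rw [if_pos rfl]
        by_cases hr : k < r.length
        · rw [if_pos hr, if_pos ⟨hk, Nat.lt_succ_self k⟩, List.getElem?_eq_getElem hr]; rfl
        · rw [if_neg hr, if_pos ⟨hk, Nat.lt_succ_self k⟩, List.getElem?_eq_none (by omega)]; rfl
      · rw [if_neg hkn, ih]
        by_cases hc : p.getD n 1 = 0
        · by_cases h2 : n < k
          · rw [if_pos ⟨hc, h2⟩, if_pos ⟨hc, by omega⟩]
          · rw [if_neg (fun h => h2 h.2), if_neg (fun h => h2 (by omega))]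
        · rw [if_neg (fun h => hc h.1), if_neg (fun h => hc h.1)]
    · rw [if_neg hk, ih]
      by_cases hc : p.getD n 1 = 0
      · have hnk : n ≠ k := fun e => hk (e ▸ hc)
        by_cases h2 : n < k
        · rw [if_pos ⟨hc, h2⟩, if_pos ⟨hc, by omega⟩]
        · rw [if_neg (fun h => h2 h.2), if_neg (fun h => h2 (by omega))]
      · rw [if_neg (fun h => hc h.1), if_neg (fun h => hc h.1)]

theorem fold_set_eq_zap (p r : List Int) :
    ((List.range r.length).foldl (fun r j => if p.getD j 1 = 0 then r.set j 0 else r) r) = zap p r := by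
  apply List.ext_getElem?
  intro n
  rw [fold_set_get?, zap_get?]
  simp only [List.getD_eq_getElem?_getD]
  by_cases hn : n < r.length
  · rw [List.getElem?_eq_getElem hn]
    by_cases hp : p[n]?.getD 1 = 0
    · simp [hp, hn]
    · simp [hp]
  · rw [List.getElem?_eq_none (l := r) (by omega)]
    simp

-- A's inner j-loop on the full matrix state equals setting row i to the row-level fold
theorem inner_fold_gen (m : List (List Int)) (i : Nat) (h1 : 1 ≤ i) (h2 : i < m.length) (k : Nat) :
    ((List.range k).foldl
        (fun m' j =>
          if (m'.getD (i-1) []).getD j 1 = 0 then m'.set i ((m'.getD i []).set j 0) else m') m)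
      = m.set i ((List.range k).foldl
          (fun r j => if (m.getD (i-1) []).getD j 1 = 0 then r.set j 0 else r) (m.getD i [])) := by
  induction k with
  | zero =>
    simp only [List.range_zero, List.foldl_nil]
    rw [List.getD_eq_getElem?_getD, List.getElem?_eq_getElem h2]
    simp [List.set_getElem_self h2]
  | succ k ih =>
    rw [List.range_succ, List.foldl_append, List.foldl_append]
    simp only [List.foldl_cons, List.foldl_nil]
    rw [ih]
    have hne : i ≠ i - 1 := by omega
    have hprev : ((m.set i ((List.range k).foldl
        (fun r j => if (m.getD (i-1) []).getD j 1 = 0 then r.set j 0 else r) (m.getD i []))).getD (i-1) [])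
        = m.getD (i-1) [] := by
      rw [List.getD_eq_getElem?_getD, List.getElem?_set_ne hne, ← List.getD_eq_getElem?_getD]
    have hcur : ((m.set i ((List.range k).foldl
        (fun r j => if (m.getD (i-1) []).getD j 1 = 0 then r.set j 0 else r) (m.getD i []))).getD i [])
        = (List.range k).foldl
          (fun r j => if (m.getD (i-1) []).getD j 1 = 0 then r.set j 0 else r) (m.getD i []) := by
      rw [List.getD_eq_getElem?_getD, List.getElem?_set_self h2]
      rfl
    rw [hprev, hcur]
    split
    · rw [List.set_set]
    · rfl

theorem inner_fold_eq (m : List (List Int)) (i : Nat) (h1 : 1 ≤ i) (h2 : i < m.length) :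
    ((List.range (m.getD i []).length).foldl
        (fun m' j =>
          if (m'.getD (i-1) []).getD j 1 = 0 then m'.set i ((m'.getD i []).set j 0) else m') m)
      = m.set i (zap (m.getD (i-1) []) (m.getD i [])) := by
  rw [inner_fold_gen m i h1 h2, fold_set_eq_zap]

theorem set_append_len (L D : List (List Int)) (v : List Int) :
    (L ++ D).set L.length v = L ++ D.set 0 v := by
  induction L with
  | nil => rfl
  | cons x L ih => simp [ih]

theorem getD_go_last (l : List (List Int)) (p : List Int) :
    (p :: go p l).getD l.length [] = lastGo p l := by
  induction l generalizing p with
  | nil => rfl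
  | cons r l ih => simpa [go, lastGo] using ih (zap p r)

theorem go_snoc (l : List (List Int)) (p : List Int) (r : List Int) :
    go p (l ++ [r]) = go p l ++ [zap (lastGo p l) r] := by
  induction l generalizing p with
  | nil => rfl
  | cons x l ih => simp [go, lastGo, ih]

-- A's outer i-loop equals the structural propagation 'go'
theorem outer_fold_eq (r0 : List Int) (rs : List (List Int)) (t : Nat) (ht : t ≤ rs.length) :
    ((List.range' 1 t).foldl
      (fun m i =>
        (List.range (m.getD i []).length).foldl
          (fun m' j =>
            if (m'.getD (i-1) []).getD j 1 = 0 then m'.set i ((m'.getD i []).set j 0) else m') m)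
      (r0 :: rs))
    = r0 :: (go r0 (rs.take t) ++ rs.drop t) := by
  induction t with
  | zero => simp [go]
  | succ t ih =>
    have ht' : t < rs.length := by omega
    have hrange : List.range' 1 (t+1) = List.range' 1 t ++ [1+t] := by
      simpa using List.range'_concat (s := 1) (n := t) (step := 1)
    rw [hrange, List.foldl_append]
    simp only [List.foldl_cons, List.foldl_nil]
    rw [ih (by omega)]
    have hP : (go r0 (rs.take t)).length = t := by
      rw [go_length, List.length_take]; omega
    have hm : (r0 :: (go r0 (rs.take t) ++ rs.drop t)) = (r0 :: go r0 (rs.take t)) ++ rs.drop t := by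
      simp
    have hlen : 1 + t < (r0 :: (go r0 (rs.take t) ++ rs.drop t)).length := by
      simp [hP, List.length_drop]; omega
    rw [inner_fold_eq _ (1+t) (by omega) hlen]
    have hDrop : rs.drop t = rs[t] :: rs.drop (t+1) := List.drop_eq_getElem_cons ht'
    have hLl : (r0 :: go r0 (rs.take t)).length = 1 + t := by simp [hP]; omega
    have hprev : (r0 :: (go r0 (rs.take t) ++ rs.drop t)).getD (1+t-1) [] = lastGo r0 (rs.take t) := by
      rw [hm, List.getD_eq_getElem?_getD]
      have h1 : 1+t-1 < (r0 :: go r0 (rs.take t)).length := by omega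
      rw [List.getElem?_append_left h1, ← List.getD_eq_getElem?_getD]
      have : (1:Nat)+t-1 = (rs.take t).length := by rw [List.length_take]; omega
      rw [this, getD_go_last]
    have hcur : (r0 :: (go r0 (rs.take t) ++ rs.drop t)).getD (1+t) [] = rs[t] := by
      rw [hm, List.getD_eq_getElem?_getD]
      rw [List.getElem?_append_right (by omega : (r0 :: go r0 (rs.take t)).length ≤ 1+t)]
      rw [hLl, hDrop]
      simp [List.getElem?_eq_getElem ht']
    rw [hprev, hcur]
    have hset : (r0 :: (go r0 (rs.take t) ++ rs.drop t)).set (1+t) (zap (lastGo r0 (rs.take t)) rs[t])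
        = (r0 :: go r0 (rs.take t)) ++ (rs.drop t).set 0 (zap (lastGo r0 (rs.take t)) rs[t]) := by
      rw [hm, ← hLl, set_append_len]
    rw [hset, hDrop]
    have htake : rs.take (t+1) = rs.take t ++ [rs[t]] := by
      rw [List.take_add_one, List.getElem?_eq_getElem ht']
      rfl
    rw [htake, go_snoc]
    simp
    rw [hDrop]
    rfl

theorem foldl_add_sum (l : List Int) (s : Int) : l.foldl (fun a x => a + x) s = s + l.sum := by
  induction l generalizing s with
  | nil => simp
  | cons x l ih => simp [ih]; ring

theorem sumAll_eq (m : List (List Int)) (s : Int) :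
    m.foldl (fun s row => row.foldl (fun a x => a + x) s) s = s + (m.map List.sum).sum := by
  induction m generalizing s with
  | nil => simp
  | cons r m ih => rw [List.foldl_cons, foldl_add_sum, ih, List.map_cons, List.sum_cons]; ring

theorem foldl_range_add (f : Nat → Int) (n : Nat) (s : Int) :
    (List.range n).foldl (fun t j => t + f j) s = s + ∑ j ∈ Finset.range n, f j := by
  induction n with
  | zero => simp
  | succ n ih =>
    rw [List.range_succ, List.foldl_append, Finset.sum_range_succ]
    simp [ih]; ring

theorem sum_eq_index (r : List Int) : r.sum = ∑ j ∈ Finset.range r.length, r.getD j 0 := by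
  induction r with
  | nil => simp
  | cons a r ih =>
    rw [List.length_cons, Finset.sum_range_succ']
    simp [ih]
    ring

-- the central identity: total of the propagated rows below a final row p, read column-wise
theorem sum_go (rs : List (List Int)) (p : List Int) (h : chainLe p.length rs) :
    ((go p rs).map List.sum).sum
      = ∑ j ∈ Finset.range p.length, (if p.getD j 1 = 0 then 0 else colSum rs j) := by
  induction rs generalizing p with
  | nil => simp [go, colSum]
  | cons r rs ih =>
    obtain ⟨hle, hch⟩ := h
    have hlen : (zap p r).length = r.length := zap_length p r
    have hIH := ih (zap p r) (by rw [hlen]; exact hch)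
    rw [hlen] at hIH
    rw [go]
    simp only [List.map_cons, List.sum_cons]
    rw [hIH, sum_eq_index (zap p r), hlen]
    -- shrink the target sum from range p.length to range r.length
    have hsub : ∑ j ∈ Finset.range p.length, (if p.getD j 1 = 0 then 0 else colSum (r :: rs) j)
        = ∑ j ∈ Finset.range r.length, (if p.getD j 1 = 0 then 0 else colSum (r :: rs) j) := by
      refine (Finset.sum_subset (Finset.range_subset_range.mpr hle) ?_).symm
      intro j _ hj
      have hj' : r.length ≤ j := by simpa using hj
      have : colSum (r :: rs) j = 0 := by
        simp [colSum, List.getElem?_eq_none hj']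
      simp [this]
    rw [hsub, ← Finset.sum_add_distrib]
    refine Finset.sum_congr rfl ?_
    intro j hj
    have hjr : j < r.length := by simpa using hj
    have hzg : (zap p r).getD j (0:Int) = if p.getD j 1 = 0 then 0 else r[j] := by
      rw [List.getD_eq_getElem?_getD, zap_get?, List.getElem?_eq_getElem hjr]
      rfl
    have hzg1 : (zap p r).getD j (1:Int) = if p.getD j 1 = 0 then 0 else r[j] := by
      rw [List.getD_eq_getElem?_getD, zap_get?, List.getElem?_eq_getElem hjr]
      rfl
    have hcs : colSum (r :: rs) j = if r[j] = 0 then 0 else r[j] + colSum rs j := by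
      simp [colSum, List.getElem?_eq_getElem hjr]
    rw [hzg, hzg1, hcs]
    split_ifs <;> simp_all

theorem chain_chainLe (r0 : List Int) (rs : List (List Int))
    (h : List.IsChain (fun a b => b.length ≤ a.length) (r0 :: rs)) : chainLe r0.length rs := by
  induction rs generalizing r0 with
  | nil => trivial
  | cons r rs ih =>
    rw [List.isChain_cons_cons] at h
    exact ⟨h.1, ih r h.2⟩

-- ===== VERDICT (by name: the statement is the Claim_ definition above) =====
theorem solution_spec : Claim_equal_solution := by
  intro matrix _ hpre
  unfold Spec_solution solution solution_alt
  cases matrix with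
  | nil => simp
  | cons r0 rs =>
    simp only [List.length_cons, Nat.add_sub_cancel]
    rw [outer_fold_eq r0 rs rs.length le_rfl]
    simp only [List.take_length, List.drop_length, List.append_nil]
    rw [sumAll_eq, foldl_range_add, zero_add, zero_add]
    simp only [List.map_cons, List.sum_cons]
    rw [sum_go rs r0 (chain_chainLe r0 rs hpre), sum_eq_index r0, ← Finset.sum_add_distrib]
    refine Finset.sum_congr rfl ?_
    intro j hj
    have hjr : j < r0.length := by simpa using hj
    have hg0 : r0.getD j (0:Int) = r0[j] := by
      rw [List.getD_eq_getElem?_getD, List.getElem?_eq_getElem hjr]; rfl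
    have hg1 : r0.getD j (1:Int) = r0[j] := by
      rw [List.getD_eq_getElem?_getD, List.getElem?_eq_getElem hjr]; rfl
    have hcs : colSum (r0 :: rs) j = if r0[j] = 0 then 0 else r0[j] + colSum rs j := by
      simp [colSum, List.getElem?_eq_getElem hjr]
    rw [hg0, hg1, hcs]
    split_ifs <;> simp_all
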